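-- pv_equiv track=rewrite | github.com/FengxianJi/The-Library-of-AI-Scientist | backend/scripts/sort_by_date.py | _split_into_entries
-- ===== SOURCE A (Python) =====
-- def _split_into_entries(text: str) -> list[str]:
--     """Split markdown text into individual paper entry blocks."""
--     entries = []
--     current = []
--     for line in text.splitlines(keepends=True):
--         if line.startswith("- [") and current:
--             entries.append("".join(current))
--             current = [line]
--         else:
--             current.append(line)
--     if current:
--         entries.append("".join(current))
--     return entries
-- ===== SOURCE B (Python) =====
-- def _split_into_entries(text: str) -> list[str]:
--     """Split markdown text into individual paper entry blocks."""
--     lines = text.splitlines(keepends=True)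
--     n = len(lines)
--     entries = []
--     i = 0
--     while i < n:
--         j = i + 1
--         while j < n and not lines[j].startswith("- ["):
--             j += 1
--         entries.append("".join(lines[i:j]))
--         i = j
--     return entries
-- ===== Notes on version B (the rewrite author's own statement) =====
-- stated objective: alternative
-- what changed: Replaces A's accumulate-and-flush loop (growing a 'current' buffer and flushing it at each '- [' boundary) with a two-level index scan: for each block start i, an inner scan finds the next '- [' line j, and lines[i:j] is joined and appended.
import Mathlib
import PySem

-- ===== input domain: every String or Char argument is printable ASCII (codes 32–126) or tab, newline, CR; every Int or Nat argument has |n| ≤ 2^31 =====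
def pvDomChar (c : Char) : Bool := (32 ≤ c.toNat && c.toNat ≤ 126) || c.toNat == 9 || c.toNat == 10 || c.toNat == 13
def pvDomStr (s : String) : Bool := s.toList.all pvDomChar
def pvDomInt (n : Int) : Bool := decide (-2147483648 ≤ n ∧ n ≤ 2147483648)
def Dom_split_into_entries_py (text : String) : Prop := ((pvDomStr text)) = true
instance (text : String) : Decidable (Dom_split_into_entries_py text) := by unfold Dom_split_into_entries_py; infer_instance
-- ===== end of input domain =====

-- B replaces A's accumulate-and-flush buffer loop with an index scan that finds each
-- block's extent (next '- [' line) and joins the slice; objective: alternative (same cost).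


-- shared primitive: Python's str.splitlines(keepends=True), exact on the domain's
-- line terminators '\n', '\r', '\r\n' (the only ones Dom admits)
def linesKeepGo : List Char → List Char → List (List Char)
  | acc, [] => if acc.isEmpty then [] else [acc]
  | acc, '\r' :: '\n' :: rest => (acc ++ ['\r', '\n']) :: linesKeepGo [] rest
  | acc, c :: rest =>
      if c = '\n' || c = '\r' then (acc ++ [c]) :: linesKeepGo [] rest
      else linesKeepGo (acc ++ [c]) rest

-- ===== PORT A =====
-- the loop body of A (one step of the for loop) and the final flush, as named helpers
def stepA (st : List String × List (List Char)) (line : List Char) : List String × List (List Char) :=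
  if PySem.Chars.startswith line ['-', ' ', '['] && !st.2.isEmpty then
    (st.1 ++ [String.ofList st.2.flatten], [line])
  else
    (st.1, st.2 ++ [line])

def finishA (st : List String × List (List Char)) : List String :=
  if st.2.isEmpty then st.1 else st.1 ++ [String.ofList st.2.flatten]

def split_into_entries_py (text : String) : List String :=
  finishA ((linesKeepGo [] text.toList).foldl stepA ([], []))

-- ===== PORT B =====
-- inner while loop of Source B: scan forward from j to the next line starting with "- ["
def scanStart (lines : List (List Char)) (j : Nat) : Nat :=
  if h : j < lines.length then
    if PySem.Chars.startswith (lines.getD j []) ['-', ' ', '['] then j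
    else scanStart lines (j + 1)
  else j
termination_by lines.length - j

theorem le_scanStart (lines : List (List Char)) (j : Nat) : j ≤ scanStart lines j := by
  fun_induction scanStart lines j with
  | case1 => omega
  | case2 _ _ _ ih => omega
  | case3 => omega

-- outer while loop of Source B
def chopFrom (lines : List (List Char)) (i : Nat) : List String :=
  if h : i < lines.length then
    let j := scanStart lines (i + 1)
    String.ofList ((PySem.List.slice lines (some (i : Int)) (some (j : Int))).flatten)
      :: chopFrom lines j
  else []
termination_by lines.length - i
decreasing_by
  have := le_scanStart lines (i + 1)
  omega

def split_into_entries_py_alt (text : String) : List String :=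
  chopFrom (linesKeepGo [] text.toList) 0

-- ===== PRECONDITION & SPEC =====
def Spec_split_into_entries_py (text : String) (out : List String) : Prop := out = split_into_entries_py_alt text
instance (text : String) (out : List String) : Decidable (Spec_split_into_entries_py text out) := by unfold Spec_split_into_entries_py; infer_instance

-- ===== CLAIM (what is proved, stated in full; the proofs are below) =====
def Claim_equal_split_into_entries_py : Prop := ∀ (text : String), Dom_split_into_entries_py text → Spec_split_into_entries_py text (split_into_entries_py text)

-- ===== LEMMAS AND PROOFS =====

-- proof-only middle form: takeWhile/dropWhile formulation of the block split
def chopTW : List (List Char) → List String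
  | [] => []
  | l :: rest =>
      String.ofList ((l :: rest.takeWhile (fun x => !PySem.Chars.startswith x ['-', ' ', '['])).flatten)
        :: chopTW (rest.dropWhile (fun x => !PySem.Chars.startswith x ['-', ' ', '[']))
termination_by l => l.length
decreasing_by
  have := List.length_dropWhile_le (fun x => !PySem.Chars.startswith x ['-', ' ', '[']) rest
  simp; omega

theorem chopTW_cons (l : List Char) (rest : List (List Char)) :
    chopTW (l :: rest)
      = String.ofList ((l :: rest.takeWhile (fun x => !PySem.Chars.startswith x ['-', ' ', '['])).flatten)
        :: chopTW (rest.dropWhile (fun x => !PySem.Chars.startswith x ['-', ' ', '['])) := by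
  rw [chopTW]

theorem take_length_takeWhile {α : Type} (p : α → Bool) (l : List α) :
    l.take (l.takeWhile p).length = l.takeWhile p := by
  induction l with
  | nil => rfl
  | cons a l ih =>
    by_cases h : p a
    · simp [h, ih]
    · simp [h]

theorem drop_length_takeWhile {α : Type} (p : α → Bool) (l : List α) :
    l.drop (l.takeWhile p).length = l.dropWhile p := by
  induction l with
  | nil => rfl
  | cons a l ih =>
    by_cases h : p a
    · simp [h, ih]
    · simp [h]

theorem scanStart_eq (lines : List (List Char)) (j : Nat) :
    scanStart lines j
      = j + ((lines.drop j).takeWhile (fun x => !PySem.Chars.startswith x ['-', ' ', '['])).length := by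
  fun_induction scanStart lines j with
  | case1 j h hs =>
    rw [List.drop_eq_getElem_cons h]
    simp only [List.getD_eq_getElem?_getD, List.getElem?_eq_getElem h, Option.getD_some] at hs
    simp [hs]
  | case2 j h hs ih =>
    rw [List.drop_eq_getElem_cons h]
    simp only [List.getD_eq_getElem?_getD, List.getElem?_eq_getElem h, Option.getD_some,
      Bool.not_eq_true] at hs
    simp only [List.takeWhile_cons, hs, Bool.not_false, if_true, List.length_cons]
    omega
  | case3 j h =>
    have : lines.drop j = [] := List.drop_eq_nil_of_le (by omega)
    simp [this]

theorem chopFrom_eq_chopTW (lines : List (List Char)) (i : Nat) :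
    chopFrom lines i = chopTW (lines.drop i) := by
  fun_induction chopFrom lines i with
  | case1 i h j ih =>
    have hj : j = (i + 1)
        + ((lines.drop (i + 1)).takeWhile (fun x => !PySem.Chars.startswith x ['-', ' ', '['])).length :=
      scanStart_eq lines (i + 1)
    rw [ih]
    have hslice : PySem.List.slice lines (some (i : Int)) (some (j : Int))
        = (lines.drop i).take (j - i) := by
      exact_mod_cast PySem.List.slice_natCast lines i j
    have htake : j - i = ((lines.drop (i + 1)).takeWhile
        (fun x => !PySem.Chars.startswith x ['-', ' ', '['])).length + 1 := by omega
    have hdropj : lines.drop j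
        = (lines.drop (i + 1)).dropWhile (fun x => !PySem.Chars.startswith x ['-', ' ', '[']) := by
      have h2 : lines.drop j = (lines.drop (i + 1)).drop
          ((lines.drop (i + 1)).takeWhile (fun x => !PySem.Chars.startswith x ['-', ' ', '['])).length := by
        rw [List.drop_drop]; congr 1
      rw [h2, drop_length_takeWhile]
    rw [hslice, htake, hdropj]
    conv_rhs => rw [List.drop_eq_getElem_cons h, chopTW_cons]
    rw [List.drop_eq_getElem_cons h, List.take_succ_cons, take_length_takeWhile]
  | case2 i h =>
    have : lines.drop i = [] := List.drop_eq_nil_of_le (by omega)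
    simp [this, chopTW]

-- A's fold with a nonempty current buffer produces exactly the takeWhile/dropWhile split
theorem foldA (ls : List (List Char)) :
    ∀ (entries : List String) (current : List (List Char)), current ≠ [] →
      finishA (ls.foldl stepA (entries, current))
      = entries
        ++ String.ofList ((current ++ ls.takeWhile (fun x => !PySem.Chars.startswith x ['-', ' ', '['])).flatten)
          :: chopTW (ls.dropWhile (fun x => !PySem.Chars.startswith x ['-', ' ', '['])) := by
  induction ls with
  | nil =>
    intro entries current hc
    simp [finishA, List.isEmpty_iff, hc, chopTW]
  | cons l ls ih =>
    intro entries current hc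
    by_cases hs : PySem.Chars.startswith l ['-', ' ', '['] = true
    · have hstep : stepA (entries, current) l = (entries ++ [String.ofList current.flatten], [l]) := by
        simp [stepA, hs, hc]
      rw [List.foldl_cons, hstep, ih _ [l] (by simp)]
      simp [hs, chopTW_cons]
    · have hs' : PySem.Chars.startswith l ['-', ' ', '['] = false := by
        simpa using hs
      have hstep : stepA (entries, current) l = (entries, current ++ [l]) := by
        simp [stepA, hs']
      rw [List.foldl_cons, hstep, ih _ (current ++ [l]) (by simp)]
      simp [hs']

-- ===== VERDICT (by name: the statement is the Claim_ definition above) =====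
theorem split_into_entries_py_spec : Claim_equal_split_into_entries_py := by
  intro text _
  unfold Spec_split_into_entries_py split_into_entries_py split_into_entries_py_alt
  rw [chopFrom_eq_chopTW, List.drop_zero]
  cases hl : linesKeepGo [] text.toList with
  | nil => simp [finishA, chopTW]
  | cons l ls =>
    have hstep : stepA ([], []) l = ([], [l]) := by
      simp [stepA]
    rw [List.foldl_cons, hstep, foldA ls [] [l] (by simp), chopTW_cons]
    simp
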